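-- pv_equiv track=rewrite | github.com/Sta-sky/-offer | exercises/调整奇偶数.py | reOrderArray
-- ===== SOURCE A (Python) =====
-- def reOrderArray(array):
--     odd = []
--     even = []
--     if len(array) <= 1:
--         return array
--     for i in array:
--         if i % 2 == 0:
--             even.append(i)
--         else:
--             odd.append(i)
--     list_ = odd + even
--     return list_
-- ===== SOURCE B (Python) =====
-- def reOrderArray(array):
--     return sorted(array, key=lambda x: x % 2 == 0)
-- ===== Notes on version B (the rewrite author's own statement) =====
-- stated objective: idiomatic
-- what changed: Replaces the explicit two-accumulator partition loop with a single stable sort on a parity key (odds get False < True for evens), so stability yields odds-then-evens in original order.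
import Mathlib
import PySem

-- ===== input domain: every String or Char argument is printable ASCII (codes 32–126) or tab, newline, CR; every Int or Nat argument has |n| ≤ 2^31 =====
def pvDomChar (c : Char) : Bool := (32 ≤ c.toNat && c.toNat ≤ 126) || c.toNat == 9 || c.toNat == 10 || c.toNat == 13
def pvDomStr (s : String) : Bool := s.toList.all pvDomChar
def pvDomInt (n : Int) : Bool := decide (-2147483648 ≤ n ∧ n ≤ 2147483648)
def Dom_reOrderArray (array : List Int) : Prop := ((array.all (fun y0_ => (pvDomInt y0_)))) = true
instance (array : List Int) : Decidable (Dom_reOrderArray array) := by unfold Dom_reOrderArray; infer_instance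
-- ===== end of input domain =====

-- B replaces A's two-accumulator partition loop with one stable sort on a parity key (idiomatic; same return values).

-- ===== PORT A =====
-- the for-loop appending into odd/even, carried as a pair accumulator
def reOrderArray (array : List Int) : List Int :=
  if array.length ≤ 1 then array
  else
    let p := array.foldl
      (fun (s : List Int × List Int) i =>
        if PySem.Int.mod i 2 == 0 then (s.1, s.2 ++ [i]) else (s.1 ++ [i], s.2))
      ([], [])
    p.1 ++ p.2

-- ===== PORT B =====
-- sorted(array, key=lambda x: x % 2 == 0): Python orders bools as ints False=0 < True=1,
-- so the bool key is ported as the Int key (0 for odd, 1 for even); exact on all ints.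
def reOrderArray_alt (array : List Int) : List Int :=
  PySem.List.sorted array (fun x => if PySem.Int.mod x 2 == 0 then (1 : Int) else 0)

-- ===== PRECONDITION & SPEC =====
def Spec_reOrderArray (array : List Int) (out : List Int) : Prop := out = reOrderArray_alt array
instance (array : List Int) (out : List Int) : Decidable (Spec_reOrderArray array out) := by unfold Spec_reOrderArray; infer_instance

-- ===== CLAIM (what is proved, stated in full; the proofs are below) =====
def Claim_equal_reOrderArray : Prop := ∀ (array : List Int), Dom_reOrderArray array → Spec_reOrderArray array (reOrderArray array)

-- ===== LEMMAS AND PROOFS =====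

def pvKey (x : Int) : Int := if PySem.Int.mod x 2 == 0 then 1 else 0

def pvBefore (a b : Int) : Bool := decide (pvKey a < pvKey b)

lemma insertBy_append_of_not_before (x : Int) (O E : List Int)
    (h : ∀ y ∈ O, pvBefore x y = false) :
    PySem.List.insertBy pvBefore x (O ++ E) = O ++ PySem.List.insertBy pvBefore x E := by
  induction O with
  | nil => simp
  | cons o t ih =>
    simp only [List.cons_append, PySem.List.insertBy]
    rw [h o (by simp)]
    simp only [Bool.false_eq_true, if_false, List.cons.injEq, true_and]
    exact ih (fun y hy => h y (by simp [hy]))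

lemma insertBy_cons_of_all_before (x : Int) (E : List Int)
    (h : ∀ y ∈ E, pvBefore x y = true) :
    PySem.List.insertBy pvBefore x E = x :: E := by
  cases E with
  | nil => rfl
  | cons e t => simp [PySem.List.insertBy, h e (by simp)]

lemma pvBefore_even_left (x y : Int) (hx : (PySem.Int.mod x 2 == 0) = true) :
    pvBefore x y = false := by
  unfold pvBefore pvKey
  rw [hx]
  cases hy : (PySem.Int.mod y 2 == 0) <;> simp

lemma pvBefore_odd_odd (x y : Int) (hx : (PySem.Int.mod x 2 == 0) = false)
    (hy : (PySem.Int.mod y 2 == 0) = false) : pvBefore x y = false := by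
  unfold pvBefore pvKey
  rw [hx, hy]
  simp

lemma pvBefore_odd_even (x y : Int) (hx : (PySem.Int.mod x 2 == 0) = false)
    (hy : (PySem.Int.mod y 2 == 0) = true) : pvBefore x y = true := by
  unfold pvBefore pvKey
  rw [hx, hy]
  simp

lemma foldl_insertBy_partition (xs O E : List Int)
    (hO : ∀ y ∈ O, (PySem.Int.mod y 2 == 0) = false)
    (hE : ∀ y ∈ E, (PySem.Int.mod y 2 == 0) = true) :
    List.foldl (fun acc x => PySem.List.insertBy pvBefore x acc) (O ++ E) xs =
      (O ++ xs.filter (fun x => !(PySem.Int.mod x 2 == 0))) ++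
      (E ++ xs.filter (fun x => PySem.Int.mod x 2 == 0)) := by
  induction xs generalizing O E with
  | nil => simp
  | cons x t ih =>
    simp only [List.foldl_cons]
    by_cases hx : (PySem.Int.mod x 2 == 0) = true
    · have hnb : ∀ y ∈ O ++ E, pvBefore x y = false := by
        intro y hy
        rcases List.mem_append.mp hy with h | h
        · exact pvBefore_even_left x y hx
        · exact pvBefore_even_left x y hx
      rw [PySem.List.insertBy_of_forall_not_before _ _ _ hnb]
      have : (O ++ E) ++ [x] = O ++ (E ++ [x]) := by simp
      rw [this, ih O (E ++ [x]) hO (by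
        intro y hy
        rcases List.mem_append.mp hy with h | h
        · exact hE y h
        · simp at h; subst h; exact hx)]
      have hf : x.fmod 2 = 0 := by simpa [PySem.Int.mod] using hx
      have h2 : x % 2 = 0 := by
        have := @Int.fmod_eq_emod x 2
        simp at this; omega
      have hd : (2:Int) ∣ x := by omega
      simp [List.filter_cons, h2, hd]
    · have hx' : (PySem.Int.mod x 2 == 0) = false := by simpa using hx
      rw [insertBy_append_of_not_before x O E
        (fun y hy => pvBefore_odd_odd x y hx' (hO y hy))]
      rw [insertBy_cons_of_all_before x E
        (fun y hy => pvBefore_odd_even x y hx' (hE y hy))]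
      have : O ++ x :: E = (O ++ [x]) ++ E := by simp
      rw [this, ih (O ++ [x]) E (by
        intro y hy
        rcases List.mem_append.mp hy with h | h
        · exact hO y h
        · simp at h; subst h; exact hx') hE]
      have h2 : x % 2 = 1 := by
        have hf : ¬ x.fmod 2 = 0 := by simpa [PySem.Int.mod] using hx'
        have hfe : x.fmod 2 = x % 2 := by
          have := @Int.fmod_eq_emod x 2
          simp at this; omega
        have he2 := Int.emod_two_eq x
        omega
      have hd : ¬ (2:Int) ∣ x := by omega
      simp [List.filter_cons, h2, hd]

lemma alt_eq_partition (xs : List Int) :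
    reOrderArray_alt xs =
      xs.filter (fun x => !(PySem.Int.mod x 2 == 0)) ++
      xs.filter (fun x => PySem.Int.mod x 2 == 0) := by
  unfold reOrderArray_alt
  rw [PySem.List.sorted_eq_foldl_insertBy]
  have h := foldl_insertBy_partition xs [] [] (by simp) (by simp)
  simp only [List.nil_append] at h
  have hbefore : (fun a b => decide ((if PySem.Int.mod a 2 == 0 then (1:Int) else 0) <
      (if PySem.Int.mod b 2 == 0 then (1:Int) else 0))) = pvBefore := by
    funext a b; simp [pvBefore, pvKey]
  rw [hbefore]
  exact h

lemma a_pair (xs : List Int) (s : List Int × List Int) :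
    xs.foldl (fun (s : List Int × List Int) i =>
        if PySem.Int.mod i 2 == 0 then (s.1, s.2 ++ [i]) else (s.1 ++ [i], s.2)) s =
      (s.1 ++ xs.filter (fun x => !(PySem.Int.mod x 2 == 0)),
       s.2 ++ xs.filter (fun x => PySem.Int.mod x 2 == 0)) := by
  induction xs generalizing s with
  | nil => simp
  | cons x t ih =>
    simp only [List.foldl_cons]
    cases hx : (PySem.Int.mod x 2 == 0) with
    | true =>
      rw [ih]
      have hf : x.fmod 2 = 0 := by simpa [PySem.Int.mod] using hx
      have h2 : x % 2 = 0 := by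
        have := @Int.fmod_eq_emod x 2
        simp at this; omega
      have hd : (2:Int) ∣ x := by omega
      simp [List.filter_cons, h2, hd]
    | false =>
      rw [ih]
      have h2 : x % 2 = 1 := by
        have hf : ¬ x.fmod 2 = 0 := by simpa [PySem.Int.mod] using hx
        have hfe : x.fmod 2 = x % 2 := by
          have := @Int.fmod_eq_emod x 2
          simp at this; omega
        have he2 := Int.emod_two_eq x
        omega
      have hd : ¬ (2:Int) ∣ x := by omega
      simp [List.filter_cons, h2, hd]

-- ===== VERDICT (by name: the statement is the Claim_ definition above) =====
theorem reOrderArray_spec : Claim_equal_reOrderArray := by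
  intro array _
  unfold Spec_reOrderArray reOrderArray
  rw [alt_eq_partition]
  by_cases h : array.length ≤ 1
  · rw [if_pos h]
    match array, h with
    | [], _ => rfl
    | [a], _ =>
      rcases Int.even_or_odd a with ⟨k, hk⟩ | ⟨k, hk⟩
      · have hd : (2:Int) ∣ a := ⟨k, by omega⟩
        simp [hd]
      · have hd : ¬ (2:Int) ∣ a := by omega
        have h2 : a % 2 = 1 := by omega
        simp [hd, h2]
  · rw [if_neg h]
    simp only [a_pair]
    simp
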